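-- pv_equiv track=rewrite | github.com/XxxGHOSTX/Thalos_Prime_New_system_build | thalos_prime/inference/__init__.py | generate_greedy
-- ===== SOURCE A (Python) =====
-- from typing import Dict, List, Optional, Any, Tuple
--
-- def generate_greedy(initial_tokens: List[int], max_length: int = 100) -> List[int]:
--     """
--     Generate text using greedy decoding.
--
--     Args:
--         initial_tokens: Initial token sequence
--         max_length: Maximum generation length
--
--     Returns:
--         Generated token sequence
--     """
--     tokens = initial_tokens.copy()
--
--     for _ in range(max_length):
--         # Simulate token generation (placeholder)
--         # In real implementation, would use model to predict next token
--         if len(tokens) > 0: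
--             # Simple continuation for demonstration
--             next_token = (tokens[-1] + 1) % 100
--         else:
--             next_token = 0
--
--         tokens.append(next_token)
--
--         # Check for end token
--         if next_token == 0:
--             break
--
--     return tokens
-- ===== SOURCE B (Python) =====
-- def generate_greedy(initial_tokens, max_length=100):
--     """Closed-form version: compute the whole appended run at once."""
--     out = initial_tokens.copy()
--     if max_length <= 0:
--         return out
--     if not out:
--         return out + [0]
--     v = out[-1]
--     k = min((-v - 1) % 100 + 1, max_length)
--     return out + [(v + i) % 100 for i in range(1, k + 1)]
-- ===== Notes on version B (the rewrite author's own statement) =====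
-- stated objective: simpler
-- what changed: Replaces A's iterate-append-test-break loop with a closed-form count of appended tokens (k = min((-v-1) % 100 + 1, max_length)) and a single list-comprehension extension, with the empty-input and max_length<=0 cases handled up front.
import Mathlib
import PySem

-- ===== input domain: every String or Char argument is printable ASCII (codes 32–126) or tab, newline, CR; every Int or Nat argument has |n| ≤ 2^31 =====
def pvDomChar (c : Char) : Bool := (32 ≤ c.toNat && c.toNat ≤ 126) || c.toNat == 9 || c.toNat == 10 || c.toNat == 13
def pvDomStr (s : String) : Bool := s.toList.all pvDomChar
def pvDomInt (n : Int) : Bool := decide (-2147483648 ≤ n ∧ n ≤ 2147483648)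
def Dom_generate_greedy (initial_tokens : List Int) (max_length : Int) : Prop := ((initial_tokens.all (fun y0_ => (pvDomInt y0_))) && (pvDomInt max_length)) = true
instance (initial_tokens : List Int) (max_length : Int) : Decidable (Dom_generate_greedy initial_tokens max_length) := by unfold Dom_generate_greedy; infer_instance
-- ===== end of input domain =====

-- B replaces A's append-one-token-at-a-time loop with a closed-form count of the
-- appended run (objective: simpler; same asymptotic cost).

-- ===== PORT A =====
-- the body of A's 'for _ in range(max_length)' loop, fuel = remaining iterations
def generateGreedyLoopA (tokens : List Int) : Nat → List Int
  | 0 => tokens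
  | n + 1 =>
    let next : Int :=
      if tokens.length > 0 then
        PySem.Int.mod ((PySem.List.pyGet? tokens (-1)).getD 0 + 1) 100
      else 0
    let tokens' := tokens ++ [next]
    if next = 0 then tokens' else generateGreedyLoopA tokens' n

def generate_greedy (initial_tokens : List Int) (max_length : Int) : List Int :=
  generateGreedyLoopA initial_tokens max_length.toNat

-- ===== PORT B =====
def generate_greedy_alt (initial_tokens : List Int) (max_length : Int) : List Int :=
  let out := initial_tokens
  if max_length ≤ 0 then out
  else if out = [] then out ++ [0]
  else
    let v : Int := (PySem.List.pyGet? out (-1)).getD 0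
    let k : Int := min (PySem.Int.mod (-v - 1) 100 + 1) max_length
    out ++ (PySem.List.pyRange 1 (k + 1) 1).map (fun i => PySem.Int.mod (v + i) 100)

-- ===== PRECONDITION & SPEC =====
def Spec_generate_greedy (initial_tokens : List Int) (max_length : Int) (out : List Int) : Prop := out = generate_greedy_alt initial_tokens max_length
instance (initial_tokens : List Int) (max_length : Int) (out : List Int) : Decidable (Spec_generate_greedy initial_tokens max_length out) := by unfold Spec_generate_greedy; infer_instance

-- ===== CLAIM (what is proved, stated in full; the proofs are below) =====
def Claim_equal_generate_greedy : Prop := ∀ (initial_tokens : List Int) (max_length : Int), Dom_generate_greedy initial_tokens max_length → Spec_generate_greedy initial_tokens max_length (generate_greedy initial_tokens max_length)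

-- ===== LEMMAS AND PROOFS =====

-- number of tokens A would append from last value v, given unlimited fuel
def pvKv (v : Int) : Int := PySem.Int.mod (-v - 1) 100 + 1

lemma pvMod (a : Int) : PySem.Int.mod a 100 = a % 100 :=
  PySem.Int.mod_eq_emod_of_pos (by norm_num)

lemma pvKv_pos (v : Int) : 1 ≤ pvKv v := by
  simp only [pvKv, pvMod]; omega

lemma loopA_eq (n : Nat) : ∀ (tokens : List Int) (v : Int), tokens.getLast? = some v →
    generateGreedyLoopA tokens n =
      tokens ++ (PySem.List.pyRange 1 (min (pvKv v) (n : Int) + 1) 1).map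
        (fun i => PySem.Int.mod (v + i) 100) := by
  induction n with
  | zero =>
    intro tokens v hv
    have h1 : (1:Int) ≤ pvKv v := pvKv_pos v
    have hmin : min (pvKv v) ((0:Nat) : Int) + 1 = 1 := by
      push_cast; omega
    rw [hmin, PySem.List.pyRange_one_eq_nil (by norm_num : (1:Int) ≤ 1)]
    simp [generateGreedyLoopA]
  | succ n ih =>
    intro tokens v hv
    have htok : tokens ≠ [] := by intro h; simp [h] at hv
    have hlen : tokens.length > 0 := List.length_pos_iff.mpr htok
    have hget : (PySem.List.pyGet? tokens (-1)).getD 0 = v := by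
      rw [PySem.List.pyGet?_neg_one, hv]; rfl
    have h1 : (1:Int) ≤ pvKv v := pvKv_pos v
    simp only [generateGreedyLoopA, if_pos hlen, hget]
    set next : Int := PySem.Int.mod (v + 1) 100 with hnext
    by_cases hz : next = 0
    · -- loop breaks right after appending next = 0
      rw [if_pos hz]
      have hkv1 : pvKv v = 1 := by
        simp only [pvKv, pvMod]; simp only [pvMod] at hnext; omega
      have hmin : min (pvKv v) ((n + 1 : Nat) : Int) + 1 = 2 := by
        push_cast; omega
      rw [hmin, show (2:Int) = 1 + 1 from rfl, PySem.List.pyRange_one_singleton]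
      simp [hnext]
    · rw [if_neg hz]
      have hlast : (tokens ++ [next]).getLast? = some next := by simp
      rw [ih (tokens ++ [next]) next hlast]
      have hm1 : (1:Int) ≤ (-v - 1) % 100 := by
        simp only [pvMod] at hnext
        by_contra h
        have h0 : (-v - 1) % 100 = 0 := by omega
        apply hz; omega
      have hkv : pvKv next = pvKv v - 1 := by
        simp only [pvKv, pvMod]; simp only [pvMod] at hnext hm1 ⊢; omega
      have hmin : min (pvKv next) (n : Int) + 1 = min (pvKv v) ((n + 1 : Nat) : Int) := by
        rw [hkv]; push_cast; omega
      set K : Int := min (pvKv v) ((n + 1 : Nat) : Int) with hK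
      have hK1 : 1 ≤ K := by push_cast [hK]; omega
      rw [List.append_assoc]
      congr 1
      -- [next] ++ map over range 1..K-1  =  map over range 1..K
      rw [hmin, PySem.List.pyRange_one_cons (by omega : (1:Int) < K + 1), List.map_cons]
      have hfirst : PySem.Int.mod (v + 1) 100 = next := hnext.symm
      rw [hfirst]
      simp only [List.singleton_append]
      congr 1
      -- shifted ranges: pyRange 1 K ↦ next+i  vs  pyRange 2 (K+1) ↦ v+i
      rw [show (1:Int) + 1 = 2 from rfl]
      rw [PySem.List.pyRange_one (a := 1) (b := K), PySem.List.pyRange_one (a := 2) (b := K + 1)]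
      rw [show (K + 1 - 2 : Int) = K - 1 by ring]
      simp only [List.map_map]
      refine List.map_congr_left ?_
      intro j hj
      simp only [Function.comp_apply]
      simp only [pvMod] at hnext ⊢
      omega

theorem generate_greedy_spec : Claim_equal_generate_greedy := by
  intro init ml _
  unfold Spec_generate_greedy generate_greedy generate_greedy_alt
  by_cases h0 : ml ≤ 0
  · have : ml.toNat = 0 := Int.toNat_of_nonpos h0
    simp [this, h0, generateGreedyLoopA]
  · have hpos : 0 < ml := by omega
    rw [if_neg h0]
    cases init with
    | nil =>
      obtain ⟨n, hn⟩ : ∃ n, ml.toNat = n + 1 := ⟨ml.toNat - 1, by omega⟩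
      rw [hn]
      simp [generateGreedyLoopA]
    | cons a t =>
      have hne : (a :: t) ≠ [] := by simp
      obtain ⟨v, hv⟩ : ∃ v, (a :: t).getLast? = some v := by
        cases h : (a :: t).getLast? with
        | none => simp at h
        | some v => exact ⟨v, rfl⟩
      rw [loopA_eq ml.toNat (a :: t) v hv]
      rw [if_neg (by simp : ¬(a :: t) = [])]
      have hget : (PySem.List.pyGet? (a :: t) (-1)).getD 0 = v := by
        rw [PySem.List.pyGet?_neg_one, hv]; rfl
      simp only [hget]
      have : ((ml.toNat : Int)) = ml := Int.toNat_of_nonneg (by omega)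
      rw [show min (pvKv v) ((ml.toNat : Int)) = min (PySem.Int.mod (-v - 1) 100 + 1) ml by
        rw [this]; rfl]
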